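-- pv_equiv track=rewrite | github.com/duonglm38/Codec | pipelines/stage5_ts.py | remap_org_data
-- ===== SOURCE A (Python) =====
-- def remap_org_data(predict_labels, tokens, org_tokens):
--     if len(tokens) == org_tokens:
--         return predict_labels
--     p = 0
--     org_p = 0
--     remap_predict_labels = []
--     while org_p < len(org_tokens):
--         if p >= len(tokens):
--             remap_predict_labels.append('O')
--         elif tokens[p] == org_tokens[org_p]:
--             remap_predict_labels.append(predict_labels[p])
--             p += 1
--             # org_p += 1
--         else:
--             assert org_tokens[org_p] == '[' or org_tokens[org_p] == ']' or org_tokens[org_p] == '<unk>', \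
--                 f"\n{tokens}\n{org_tokens}"
--             remap_predict_labels.append('O')
--             # org_p += 1
--         org_p += 1
--     is_opening = False
--     prev_tag = "O"
--     i = 0
--     while i < len(remap_predict_labels):
--         tag = remap_predict_labels[i]
--         if tag.startswith('B-'):
--             is_opening = True
--             prev_tag = tag[2:]
--         elif tag == 'O':
--             is_opening = False
--         elif tag.startswith('I-') and not is_opening:
--             j = i - 1
--             while j >= 0 and remap_predict_labels[j] == 'O':
--                 remap_predict_labels[j] = 'I-' + prev_tag
--                 j -= 1
--         i += 1
--     return remap_predict_labels
-- ===== SOURCE B (Python) =====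
-- def remap_org_data(predict_labels, tokens, org_tokens):
--     # pass 1: align predictions onto the original tokens (same as the original)
--     p = 0
--     labels = []
--     for org_p in range(len(org_tokens)):
--         if p >= len(tokens):
--             labels.append('O')
--         elif tokens[p] == org_tokens[org_p]:
--             labels.append(predict_labels[p])
--             p += 1
--         else:
--             assert org_tokens[org_p] == '[' or org_tokens[org_p] == ']' or org_tokens[org_p] == '<unk>', \
--                 f"\n{tokens}\n{org_tokens}"
--             labels.append('O')
--     # pass 2: single forward scan; track the length of the trailing 'O'-run
--     # instead of rescanning backwards on every orphan 'I-' tag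
--     out = []
--     prev_tag = 'O'
--     is_opening = False
--     run = 0  # length of the maximal block of 'O' at the end of out
--     for tag in labels:
--         if tag.startswith('B-'):
--             is_opening = True
--             prev_tag = tag[2:]
--             run = 0
--         elif tag == 'O':
--             is_opening = False
--             run += 1
--         else:
--             if tag.startswith('I-') and not is_opening and run > 0:
--                 out[-run:] = ['I-' + prev_tag] * run
--             run = 0
--         out.append(tag)
--     return out
-- ===== Notes on version B (the rewrite author's own statement) =====
-- stated objective: alternative
-- what changed: The second pass's nested backward while-loop that rewrites stray 'O' runs before an orphan 'I-' tag is replaced by a single forward scan that tracks the length of the trailing 'O'-run and rewrites it in one slice assignment.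
import Mathlib
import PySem

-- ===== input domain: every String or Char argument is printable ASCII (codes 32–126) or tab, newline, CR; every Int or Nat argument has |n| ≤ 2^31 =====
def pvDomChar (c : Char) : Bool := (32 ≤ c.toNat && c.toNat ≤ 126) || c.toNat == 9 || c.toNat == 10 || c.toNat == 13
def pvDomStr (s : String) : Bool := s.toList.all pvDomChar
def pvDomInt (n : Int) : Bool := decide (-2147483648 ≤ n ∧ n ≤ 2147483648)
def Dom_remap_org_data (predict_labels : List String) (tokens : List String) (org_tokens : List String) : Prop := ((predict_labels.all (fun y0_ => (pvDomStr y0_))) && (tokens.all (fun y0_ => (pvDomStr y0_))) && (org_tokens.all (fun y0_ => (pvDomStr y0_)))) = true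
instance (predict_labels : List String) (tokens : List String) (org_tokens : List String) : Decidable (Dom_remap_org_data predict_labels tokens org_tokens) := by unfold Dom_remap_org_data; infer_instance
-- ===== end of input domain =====

-- B rewrites A's second pass (the stray-'I-' fix) as a single forward scan that tracks the
-- length of the trailing 'O'-run, removing A's nested backward rescan; objective: alternative.

-- ===== PORT A =====

-- Pass 1 (identical Python code in A and in Source B): align predictions onto the org tokens.
-- Python's AssertionError / IndexError on predict_labels[p] raise exactly outside Pre_ below;
-- on Pre_ the getD defaults are never reached.
def pvAlign (predict_labels : List String) (tokens : List String) (p : Nat)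
    (orgs : List String) : List String :=
  match orgs with
  | [] => []
  | o :: os =>
    if p ≥ tokens.length then
      "O" :: pvAlign predict_labels tokens p os
    else if tokens.getD p "" = o then
      predict_labels.getD p "" :: pvAlign predict_labels tokens (p + 1) os
    else
      "O" :: pvAlign predict_labels tokens p os

-- A's inner backward while loop: overwrite l[j], l[j-1], … with 'I-'+prev while they are 'O'.
-- Structural recursion on n = j+1 (the number of positions left below the start index).
def pvFillAux (prev : String) (l : List String) : Nat → List String
  | 0 => l
  | n + 1 => if l.getD n "" = "O" then pvFillAux prev (l.set n ("I-" ++ prev)) n else l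

def pvFillBack (prev : String) (l : List String) (j : Int) : List String :=
  pvFillAux prev l (j + 1).toNat

-- A's pass 2: forward index loop over the in-place mutated label list
-- (Python's `tag` is `l[i]`, written out at each use; fuel = l.length - i ticks once per
-- iteration of the while loop, whose guard i < l.length is kept as written).
def pvPassAux (l : List String) (i : Nat) (opening : Bool) (prev : String) : Nat → List String
  | 0 => l
  | fuel + 1 =>
    if i < l.length then
      if PySem.Str.startswith (l.getD i "") "B-" then
        pvPassAux l (i + 1) true (PySem.Str.slice (l.getD i "") (some 2) none) fuel
      else if l.getD i "" = "O" then
        pvPassAux l (i + 1) false prev fuel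
      else if PySem.Str.startswith (l.getD i "") "I-" ∧ ¬ opening then
        pvPassAux (pvFillBack prev l ((i : Int) - 1)) (i + 1) opening prev fuel
      else
        pvPassAux l (i + 1) opening prev fuel
    else l

def pvPassA (l : List String) (i : Nat) (opening : Bool) (prev : String) : List String :=
  pvPassAux l i opening prev (l.length - i)

-- A's `if len(tokens) == org_tokens:` compares an int with a list: always False in Python; omitted.
def remap_org_data (predict_labels : List String) (tokens : List String) (org_tokens : List String) : List String :=
  pvPassA (pvAlign predict_labels tokens 0 org_tokens) 0 false "O"

-- ===== PORT B =====

-- Source B's pass-2 loop body: state (out, prev_tag, is_opening, run).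
def pvStepB (st : List String × String × Bool × Nat) (tag : String) : List String × String × Bool × Nat :=
  let (out, prev, opening, run) := st
  if PySem.Str.startswith tag "B-" then
    (out ++ [tag], PySem.Str.slice tag (some 2) none, true, 0)
  else if tag = "O" then
    (out ++ [tag], prev, false, run + 1)
  else if PySem.Str.startswith tag "I-" ∧ ¬ opening ∧ 0 < run then
    (out.take (out.length - run) ++ List.replicate run ("I-" ++ prev) ++ [tag], prev, opening, 0)
  else
    (out ++ [tag], prev, opening, 0)

def remap_org_data_alt (predict_labels : List String) (tokens : List String) (org_tokens : List String) : List String :=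
  ((pvAlign predict_labels tokens 0 org_tokens).foldl pvStepB ([], "O", false, 0)).1

-- ===== PRECONDITION & SPEC =====

-- Pre_ excludes exactly the inputs on which the Python A raises during alignment: an org token
-- that neither matches the next unconsumed token nor is '[' / ']' / '<unk>' (AssertionError),
-- or a match with no predict label left (IndexError on predict_labels[p]).
-- np = number of predict labels still available.
def pvOk (np : Nat) (toks : List String) (orgs : List String) : Bool :=
  match orgs with
  | [] => true
  | o :: os =>
    match toks with
    | [] => pvOk np [] os
    | t :: ts =>
      if t = o then decide (0 < np) && pvOk (np - 1) ts os
      else decide (o = "[" ∨ o = "]" ∨ o = "<unk>") && pvOk np (t :: ts) os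

def Pre_remap_org_data (predict_labels : List String) (tokens : List String) (org_tokens : List String) : Prop :=
  pvOk predict_labels.length tokens org_tokens = true
instance (predict_labels : List String) (tokens : List String) (org_tokens : List String) : Decidable (Pre_remap_org_data predict_labels tokens org_tokens) := by unfold Pre_remap_org_data; infer_instance

def pvWitness_remap_org_data : List String × List String × List String :=
  (["B-PER", "O", "I-LOC"], ["a", "b", "c"], ["a", "[", "b", "<unk>", "c"])

def Spec_remap_org_data (predict_labels : List String) (tokens : List String) (org_tokens : List String) (out : List String) : Prop := out = remap_org_data_alt predict_labels tokens org_tokens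
instance (predict_labels : List String) (tokens : List String) (org_tokens : List String) (out : List String) : Decidable (Spec_remap_org_data predict_labels tokens org_tokens out) := by unfold Spec_remap_org_data; infer_instance

-- ===== CLAIM (what is proved, stated in full; the proofs are below) =====
def Claim_equal_remap_org_data : Prop := ∀ (predict_labels : List String) (tokens : List String) (org_tokens : List String), Dom_remap_org_data predict_labels tokens org_tokens → Pre_remap_org_data predict_labels tokens org_tokens → Spec_remap_org_data predict_labels tokens org_tokens (remap_org_data predict_labels tokens org_tokens)

-- ===== LEMMAS AND PROOFS =====

-- A's backward fill started just past a maximal trailing 'O'-run of length run sitting after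
-- front: it rewrites exactly that run.
theorem fillAux_eq (prev : String) (run : Nat) (front rest : List String)
    (hfr : front = [] ∨ front.getLast? ≠ some "O") :
    pvFillAux prev (front ++ List.replicate run "O" ++ rest) (front.length + run)
      = front ++ List.replicate run ("I-" ++ prev) ++ rest := by
  induction run generalizing rest with
  | zero =>
    rcases Nat.eq_zero_or_pos front.length with hfl | hfl
    · have hnil : front = [] := List.eq_nil_of_length_eq_zero hfl
      subst hnil; simp [pvFillAux]
    · have h : front.getLast? ≠ some "O" := by
        rcases hfr with h | h
        · subst h; simp at hfl
        · exact h
      have hno : ¬ ((front ++ List.replicate 0 "O" ++ rest).getD (front.length - 1) "" = "O") := by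
        intro hO
        apply h
        simp only [List.replicate_zero, List.append_nil] at hO
        rw [List.getD_eq_getElem?_getD, List.getElem?_append_left (by omega)] at hO
        have hlt : front.length - 1 < front.length := by omega
        rw [List.getLast?_eq_getElem?]
        simp [List.getElem?_eq_getElem hlt] at hO ⊢
        exact hO
      rw [show front.length + 0 = (front.length - 1) + 1 by omega, pvFillAux, if_neg hno]
      simp
  | succ n ih =>
    have hlen : (front ++ List.replicate n "O").length = front.length + n := by simp
    rw [show front.length + (n + 1) = (front.length + n) + 1 by omega, pvFillAux]
    rw [if_pos]
    · rw [show front ++ List.replicate (n+1) "O" ++ rest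
          = (front ++ List.replicate n "O") ++ ("O" :: rest) by simp [List.replicate_succ']]
      rw [← hlen, List.set_append_right _ _ (by omega)]
      simp only [hlen, Nat.sub_self]
      rw [show (("O" :: rest).set 0 ("I-" ++ prev)) = ("I-" ++ prev) :: rest from rfl]
      rw [ih (("I-" ++ prev) :: rest)]
      simp [List.replicate_succ']
    · rw [show front ++ List.replicate (n+1) "O" ++ rest
          = (front ++ List.replicate n "O") ++ ("O" :: rest) by simp [List.replicate_succ']]
      rw [List.getD_eq_getElem?_getD, ← hlen, List.getElem?_append_right (by omega)]
      simp [hlen]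

theorem ne_O_of_startswith (t p : String) (hp : PySem.Str.startswith "O" p = false)
    (h : PySem.Str.startswith t p = true) : t ≠ "O" := by
  intro he; subst he; rw [hp] at h; exact Bool.false_ne_true h

-- Main invariant: A's in-place forward scan, at index front.length+run on a list whose
-- processed prefix is front ++ run copies of 'O' (run = maximal trailing 'O'-run), computes
-- B's fold over the remaining suffix.
theorem pass_eq (suffix : List String) : ∀ (front : List String) (run : Nat) (opening : Bool) (prev : String),
    (front = [] ∨ front.getLast? ≠ some "O") →
    pvPassAux (front ++ List.replicate run "O" ++ suffix) (front.length + run) opening prev suffix.length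
      = (suffix.foldl pvStepB (front ++ List.replicate run "O", prev, opening, run)).1 := by
  induction suffix with
  | nil =>
    intro front run opening prev hfr
    simp [pvPassAux]
  | cons tag rest ih =>
    intro front run opening prev hfr
    have hout : (front ++ List.replicate run "O").length = front.length + run := by simp
    have htag : (front ++ List.replicate run "O" ++ (tag :: rest)).getD (front.length + run) "" = tag := by
      rw [List.getD_eq_getElem?_getD, ← hout, List.getElem?_append_right (by omega)]
      simp
    rw [List.length_cons, pvPassAux, if_pos (by simp only [List.length_append, List.length_replicate, List.length_cons, List.length_nil]; omega), htag, List.foldl_cons]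
    by_cases hB : PySem.Str.startswith tag "B-" = true
    · rw [if_pos hB]
      have htagO : tag ≠ "O" := ne_O_of_startswith tag "B-" (by decide) hB
      have hstep : pvStepB (front ++ List.replicate run "O", prev, opening, run) tag
          = (front ++ List.replicate run "O" ++ [tag], PySem.Str.slice tag (some 2) none, true, 0) := by
        simp only [pvStepB]; rw [if_pos hB]
      rw [hstep]
      rw [show front ++ List.replicate run "O" ++ (tag :: rest)
          = (front ++ List.replicate run "O" ++ [tag]) ++ List.replicate 0 "O" ++ rest by simp]
      rw [show front.length + run + 1 = (front ++ List.replicate run "O" ++ [tag]).length + 0 by simp only [List.length_append, List.length_replicate, List.length_cons, List.length_nil]; try omega]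
      rw [show rest.length = (rest.length : Nat) from rfl, ih _ 0 true _ (Or.inr (by simp [htagO]))]
      simp
    · rw [if_neg hB]
      by_cases hO : tag = "O"
      · rw [if_pos hO]
        subst hO
        have hstep : pvStepB (front ++ List.replicate run "O", prev, opening, run) "O"
            = (front ++ List.replicate run "O" ++ ["O"], prev, false, run + 1) := by
          simp [pvStepB] <;> decide
        rw [hstep]
        rw [show front ++ List.replicate run "O" ++ ("O" :: rest)
            = front ++ List.replicate (run + 1) "O" ++ rest by simp [List.replicate_succ']]
        rw [show front.length + run + 1 = front.length + (run + 1) by omega]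
        rw [ih front (run + 1) false prev hfr]
        simp [List.replicate_succ']
      · by_cases hI : PySem.Str.startswith tag "I-" = true ∧ ¬ opening
        · rw [if_neg hO, if_pos hI]
          have hfill : pvFillBack prev (front ++ List.replicate run "O" ++ (tag :: rest))
              (((front.length + run : Nat) : Int) - 1)
              = front ++ List.replicate run ("I-" ++ prev) ++ (tag :: rest) := by
            unfold pvFillBack
            rw [show ((((front.length + run : Nat) : Int)) - 1 + 1).toNat = front.length + run by omega]
            exact fillAux_eq prev run front (tag :: rest) hfr
          rw [hfill]
          have hstep : pvStepB (front ++ List.replicate run "O", prev, opening, run) tag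
              = (front ++ List.replicate run ("I-" ++ prev) ++ [tag], prev, opening, 0) := by
            rcases Nat.eq_zero_or_pos run with hr | hr
            · subst hr
              have hni : ¬ (PySem.Str.startswith tag "I-" = true ∧ ¬ opening ∧ 0 < (0 : Nat)) := by
                rintro ⟨_, _, hc⟩; omega
              simp only [pvStepB]; rw [if_neg hB, if_neg hO, if_neg hni]; simp
            · have hc : PySem.Str.startswith tag "I-" = true ∧ ¬ opening ∧ 0 < run := ⟨hI.1, hI.2, hr⟩
              simp only [pvStepB]; rw [if_neg hB, if_neg hO, if_pos hc]
              rw [hout, show front.length + run - run = front.length by omega]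
              rw [List.take_append_of_le_length (le_refl _)]
              simp
          rw [hstep]
          rw [show front ++ List.replicate run ("I-" ++ prev) ++ (tag :: rest)
              = (front ++ List.replicate run ("I-" ++ prev) ++ [tag]) ++ List.replicate 0 "O" ++ rest by simp]
          rw [show front.length + run + 1
              = (front ++ List.replicate run ("I-" ++ prev) ++ [tag]).length + 0 by simp only [List.length_append, List.length_replicate, List.length_cons, List.length_nil]; try omega]
          rw [ih _ 0 opening prev (Or.inr (by simp [hO]))]
          simp
        · rw [if_neg hO, if_neg hI]
          have hstep : pvStepB (front ++ List.replicate run "O", prev, opening, run) tag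
              = (front ++ List.replicate run "O" ++ [tag], prev, opening, 0) := by
            have hni : ¬ (PySem.Str.startswith tag "I-" = true ∧ ¬ opening ∧ 0 < run) := by
              rintro ⟨a, b, _⟩; exact hI ⟨a, b⟩
            simp only [pvStepB]; rw [if_neg hB, if_neg hO, if_neg hni]
          rw [hstep]
          rw [show front ++ List.replicate run "O" ++ (tag :: rest)
              = (front ++ List.replicate run "O" ++ [tag]) ++ List.replicate 0 "O" ++ rest by simp]
          rw [show front.length + run + 1 = (front ++ List.replicate run "O" ++ [tag]).length + 0 by simp only [List.length_append, List.length_replicate, List.length_cons, List.length_nil]; try omega]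
          rw [ih _ 0 opening prev (Or.inr (by simp [hO]))]
          simp

-- ===== VERDICT (by name: the statement is the Claim_ definition above) =====
theorem remap_org_data_spec : Claim_equal_remap_org_data := by
  intro pl toks orgs _ _
  unfold Spec_remap_org_data remap_org_data remap_org_data_alt pvPassA
  have h := pass_eq (pvAlign pl toks 0 orgs) [] 0 false "O" (Or.inl rfl)
  simpa using h
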